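-- pv_equiv track=rewrite | github.com/teaguetomesh/dqva-and-circuit-cutting | no_mitigation/evaluator_prob.py | find_cluster_O_rho_qubits
-- ===== SOURCE A (Python) =====
-- def find_cluster_O_rho_qubits(complete_path_map,cluster_idx):
--     O_qubits = []
--     rho_qubits = []
--     for input_qubit in complete_path_map:
--         path = complete_path_map[input_qubit]
--         if len(path)>1:
--             for q in path[:-1]:
--                 if q[0] == cluster_idx:
--                     O_qubits.append(q)
--             for q in path[1:]:
--                 if q[0] == cluster_idx:
--                     rho_qubits.append(q)
--     return O_qubits, rho_qubits
-- ===== SOURCE B (Python) =====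
-- def find_cluster_O_rho_qubits(complete_path_map, cluster_idx):
--     O_qubits = []
--     rho_qubits = []
--     for path in complete_path_map.values():
--         if len(path) > 1:
--             matches = [q for q in path if q[0] == cluster_idx]
--             O_qubits += matches[:-1] if path[-1][0] == cluster_idx else matches
--             rho_qubits += matches[1:] if path[0][0] == cluster_idx else matches
--     return O_qubits, rho_qubits
-- ===== Notes on version B (the rewrite author's own statement) =====
-- stated objective: alternative
-- what changed: Instead of A's two filtered scans over the slices path[:-1] and path[1:], B filters each whole path once for matching qubits and then trims that filtered list at the boundary: it drops the last match when the path's last element matches and the first match when the path's first element matches.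
import Mathlib
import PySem

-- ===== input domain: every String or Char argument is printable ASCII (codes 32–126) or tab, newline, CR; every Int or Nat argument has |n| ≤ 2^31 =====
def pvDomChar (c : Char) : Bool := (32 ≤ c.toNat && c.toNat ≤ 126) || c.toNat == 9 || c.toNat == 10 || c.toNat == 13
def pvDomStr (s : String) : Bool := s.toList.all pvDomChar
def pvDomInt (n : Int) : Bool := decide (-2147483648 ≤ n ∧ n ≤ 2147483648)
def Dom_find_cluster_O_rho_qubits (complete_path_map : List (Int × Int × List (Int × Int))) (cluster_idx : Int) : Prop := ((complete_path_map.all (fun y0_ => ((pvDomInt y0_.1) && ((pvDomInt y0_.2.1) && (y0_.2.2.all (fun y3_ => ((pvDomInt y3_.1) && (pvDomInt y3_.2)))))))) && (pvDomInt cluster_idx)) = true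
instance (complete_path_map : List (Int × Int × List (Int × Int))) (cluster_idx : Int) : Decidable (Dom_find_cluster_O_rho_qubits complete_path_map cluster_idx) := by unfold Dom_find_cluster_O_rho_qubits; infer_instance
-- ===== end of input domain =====

-- B replaces A's two filtered slice scans by one filter of the whole path plus boundary trimming; same cost, different algorithmic decomposition.

-- ===== PORT A =====
-- two separate filtered scans, one over path[:-1] for O_qubits and one over path[1:] for rho_qubits
def find_cluster_O_rho_qubits (complete_path_map : List (Int × Int × List (Int × Int))) (cluster_idx : Int) : (List (Int × Int)) × (List (Int × Int)) :=
  complete_path_map.foldl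
    (fun acc e =>
      let path := e.2.2
      if 1 < path.length then
        let O := (PySem.List.slice path none (some (-1))).foldl
          (fun o q => if q.1 = cluster_idx then o ++ [q] else o) acc.1
        let rho := (PySem.List.slice path (some 1) none).foldl
          (fun r q => if q.1 = cluster_idx then r ++ [q] else r) acc.2
        (O, rho)
      else acc)
    ([], [])

-- ===== PORT B =====
-- B filters each long path once, then trims the filtered list at the boundary:
-- drops its last element when path[-1] matches, its first when path[0] matches.
-- 'path[-1][0] == cluster_idx' is hand-ported as Option.any over pyGet? (exact: the
-- index cannot be out of range under the len(path) > 1 guard, so pyGet? is some).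
def find_cluster_O_rho_qubits_alt (complete_path_map : List (Int × Int × List (Int × Int))) (cluster_idx : Int) : (List (Int × Int)) × (List (Int × Int)) :=
  complete_path_map.foldl
    (fun acc e =>
      let path := e.2.2
      if 1 < path.length then
        let ms := path.filter (fun q => decide (q.1 = cluster_idx))
        let O := acc.1 ++
          (if (PySem.List.pyGet? path (-1)).any (fun q => decide (q.1 = cluster_idx))
           then PySem.List.slice ms none (some (-1)) else ms)
        let rho := acc.2 ++
          (if (PySem.List.pyGet? path 0).any (fun q => decide (q.1 = cluster_idx))
           then PySem.List.slice ms (some 1) none else ms)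
        (O, rho)
      else acc)
    ([], [])

-- ===== PRECONDITION & SPEC =====
def Spec_find_cluster_O_rho_qubits (complete_path_map : List (Int × Int × List (Int × Int))) (cluster_idx : Int) (out : (List (Int × Int)) × (List (Int × Int))) : Prop := out = find_cluster_O_rho_qubits_alt complete_path_map cluster_idx
instance (complete_path_map : List (Int × Int × List (Int × Int))) (cluster_idx : Int) (out : (List (Int × Int)) × (List (Int × Int))) : Decidable (Spec_find_cluster_O_rho_qubits complete_path_map cluster_idx out) := by unfold Spec_find_cluster_O_rho_qubits; infer_instance

-- ===== CLAIM (what is proved, stated in full; the proofs are below) =====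
def Claim_equal_find_cluster_O_rho_qubits : Prop := ∀ (complete_path_map : List (Int × Int × List (Int × Int))) (cluster_idx : Int), Dom_find_cluster_O_rho_qubits complete_path_map cluster_idx → Spec_find_cluster_O_rho_qubits complete_path_map cluster_idx (find_cluster_O_rho_qubits complete_path_map cluster_idx)

-- ===== LEMMAS AND PROOFS =====

-- dropping the last element before filtering = filtering then (when the last element matches) dropping the last match
theorem filter_dropLast (path : List (Int × Int)) (c : Int) (h : path ≠ []) :
    path.dropLast.filter (fun q => decide (q.1 = c))
      = if (PySem.List.pyGet? path (-1)).any (fun q => decide (q.1 = c))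
        then (path.filter (fun q => decide (q.1 = c))).dropLast
        else path.filter (fun q => decide (q.1 = c)) := by
  obtain ⟨xs, y, rfl⟩ : ∃ xs y, path = xs ++ [y] := by
    rcases List.eq_nil_or_concat path with h' | ⟨xs, y, h'⟩
    · exact absurd h' h
    · exact ⟨xs, y, by simpa using h'⟩
  rw [PySem.List.pyGet?_neg_one_append_singleton, List.dropLast_concat, List.filter_append]
  by_cases hc : y.1 = c <;> simp [hc]

-- taking the tail before filtering = filtering then (when the head matches) dropping the first match
theorem filter_tail (path : List (Int × Int)) (c : Int) (h : path ≠ []) :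
    path.tail.filter (fun q => decide (q.1 = c))
      = if (PySem.List.pyGet? path 0).any (fun q => decide (q.1 = c))
        then (path.filter (fun q => decide (q.1 = c))).tail
        else path.filter (fun q => decide (q.1 = c)) := by
  obtain ⟨x, xs, rfl⟩ : ∃ x xs, path = x :: xs := by
    cases path with
    | nil => exact absurd rfl h
    | cons x xs => exact ⟨x, xs, rfl⟩
  rw [PySem.List.pyGet?_zero_cons, List.filter_cons]
  by_cases hc : x.1 = c <;> simp [hc]

-- the two outer folds coincide for every accumulator
theorem fold_eq (m : List (Int × Int × List (Int × Int))) (c : Int) :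
    ∀ acc : (List (Int × Int)) × (List (Int × Int)),
    m.foldl
      (fun acc e =>
        let path := e.2.2
        if 1 < path.length then
          let O := (PySem.List.slice path none (some (-1))).foldl
            (fun o q => if q.1 = c then o ++ [q] else o) acc.1
          let rho := (PySem.List.slice path (some 1) none).foldl
            (fun r q => if q.1 = c then r ++ [q] else r) acc.2
          (O, rho)
        else acc) acc
    = m.foldl
      (fun acc e =>
        let path := e.2.2
        if 1 < path.length then
          let ms := path.filter (fun q => decide (q.1 = c))
          let O := acc.1 ++
            (if (PySem.List.pyGet? path (-1)).any (fun q => decide (q.1 = c))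
             then PySem.List.slice ms none (some (-1)) else ms)
          let rho := acc.2 ++
            (if (PySem.List.pyGet? path 0).any (fun q => decide (q.1 = c))
             then PySem.List.slice ms (some 1) none else ms)
          (O, rho)
        else acc) acc := by
  induction m with
  | nil => intro acc; rfl
  | cons e es ih =>
    intro acc
    rw [List.foldl_cons, List.foldl_cons, ih]
    congr 1
    show (if 1 < e.2.2.length then _ else _) = (if 1 < e.2.2.length then _ else _)
    by_cases hlen : 1 < e.2.2.length
    · rw [if_pos hlen, if_pos hlen]
      have hne : e.2.2 ≠ [] := by
        intro h; rw [h] at hlen; simp at hlen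
      rw [PySem.List.slice_to_neg_one e.2.2, PySem.List.slice_from_one e.2.2,
        PySem.List.foldl_append_ite_eq_filter, PySem.List.foldl_append_ite_eq_filter,
        filter_dropLast e.2.2 c hne, filter_tail e.2.2 c hne]
      simp only [PySem.List.slice_to_neg_one, PySem.List.slice_from_one]
    · rw [if_neg hlen, if_neg hlen]

-- ===== VERDICT (by name: the statement is the Claim_ definition above) =====
theorem find_cluster_O_rho_qubits_spec : Claim_equal_find_cluster_O_rho_qubits := by
  intro m c _
  unfold Spec_find_cluster_O_rho_qubits find_cluster_O_rho_qubits find_cluster_O_rho_qubits_alt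
  exact fold_eq m c ([], [])
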